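-- pv_equiv track=rewrite | github.com/jamesben6688/coding | sort/教授给学生打分.py | score_student
-- ===== SOURCE A (Python) =====
-- def score_student(scores):
--     """
--         leetcode 1996
--     :param sores:
--     :return:
--     """
--     scores = [(scores[i], i) for i in range(len(scores))]
--     scores = sorted(scores, key=lambda x: (-x[0][0], x[0][1]))
--     ans = [""] * len(scores)
--     pre_max = -1
--     for i in range(len(scores)):
--         if scores[i][0][1] < pre_max:
--             ans[scores[i][1]] = 'fail'
--         else:
--             ans[scores[i][1]] = 'pass'
--             pre_max = scores[i][0][1]
--     return ans
-- ===== SOURCE B (Python) =====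
-- def score_student(scores):
--     def best_dominator_defense(a, d):
--         best = -1
--         for t in scores:
--             if t[0] > a and t[1] > d and t[1] > best:
--                 best = t[1]
--         return best
--     return ['fail' if s[1] < best_dominator_defense(s[0], s[1]) else 'pass' for s in scores]
-- ===== Notes on version B (the rewrite author's own statement) =====
-- stated objective: simpler
-- what changed: Replaces the sort-by-(-attack,defense) plus running-max sweep (with index bookkeeping back into the original order) by a direct per-element quadratic scan that computes the largest defense among strict dominators, keeping A's -1 base value of the running max so behaviour matches A exactly (an element with defense < -1 and no strict dominator is still 'fail').
import Mathlib
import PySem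

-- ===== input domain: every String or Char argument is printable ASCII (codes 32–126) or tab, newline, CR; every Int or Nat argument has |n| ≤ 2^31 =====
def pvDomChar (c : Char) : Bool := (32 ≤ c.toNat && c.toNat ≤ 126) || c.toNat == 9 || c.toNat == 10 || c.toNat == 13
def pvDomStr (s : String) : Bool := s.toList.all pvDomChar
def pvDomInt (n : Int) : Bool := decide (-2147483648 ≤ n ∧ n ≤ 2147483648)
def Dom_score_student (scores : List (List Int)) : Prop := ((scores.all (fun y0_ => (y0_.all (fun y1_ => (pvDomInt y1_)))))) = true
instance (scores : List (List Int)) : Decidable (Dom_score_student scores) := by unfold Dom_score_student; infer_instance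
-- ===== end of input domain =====

-- B replaces A's sort-by-(-attack,defense) + running-max sweep (with index bookkeeping
-- back into the original order) by a per-element quadratic scan for the largest defense
-- among strict dominators, keeping A's -1 base of the running max; objective: simpler.

-- ===== PORT A =====
-- s[0] / s[1]; exact inside Pre_ (every inner list has length ≥ 2, else Python raises IndexError)
def pvAtt (s : List Int) : Int := (PySem.List.pyGet? s 0).getD 0
def pvDef (s : List Int) : Int := (PySem.List.pyGet? s 1).getD 0

-- the for-loop over the sorted list, state = (ans, pre_max); ans[idx] = v is pySetD
def scoreGo : List (List Int × Int) → List String → Int → List String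
  | [], ans, _ => ans
  | (s, idx) :: rest, ans, preMax =>
    if pvDef s < preMax then scoreGo rest (PySem.List.pySetD ans idx "fail") preMax
    else scoreGo rest (PySem.List.pySetD ans idx "pass") (pvDef s)

def score_student (scores : List (List Int)) : List String :=
  let pairs := (PySem.List.pyRange 0 scores.length 1).map
      (fun i => (PySem.List.pyGetD scores i [], i))
  let sortedPairs := PySem.List.sorted2 pairs (fun x => -(pvAtt x.1)) (fun x => pvDef x.1)
  scoreGo sortedPairs (List.replicate scores.length "") (-1)

-- ===== PORT B =====
-- inner loop of Source B: the largest defense among strict dominators of (a, d), base -1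
def pvBestDom (scores : List (List Int)) (a d : Int) : Int :=
  scores.foldl (fun best t =>
    if pvAtt t > a ∧ pvDef t > d ∧ pvDef t > best then pvDef t else best) (-1)

def score_student_alt (scores : List (List Int)) : List String :=
  scores.map (fun s =>
    if pvDef s < pvBestDom scores (pvAtt s) (pvDef s) then "fail" else "pass")

-- ===== PRECONDITION & SPEC =====
-- Pre_ excludes exactly the inputs on which Python A raises: an inner list with fewer
-- than two entries makes scores[i][0] / scores[i][1] an IndexError.
def Pre_score_student (scores : List (List Int)) : Prop := ∀ s ∈ scores, 2 ≤ s.length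
instance (scores : List (List Int)) : Decidable (Pre_score_student scores) := by
  unfold Pre_score_student; infer_instance

def pvWitness_score_student : List (List Int) := [[5, 3], [1, 2], [4, 4]]

def Spec_score_student (scores : List (List Int)) (out : List String) : Prop := out = score_student_alt scores
instance (scores : List (List Int)) (out : List String) : Decidable (Spec_score_student scores out) := by unfold Spec_score_student; infer_instance

-- ===== CLAIM (what is proved, stated in full; the proofs are below) =====
def Claim_equal_score_student : Prop := ∀ (scores : List (List Int)), Dom_score_student scores → Pre_score_student scores → Spec_score_student scores (score_student scores)

-- ===== LEMMAS AND PROOFS =====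

-- the strict "comes earlier in A's sort" comparison produced by sorted2's keys
def pvBfr (x y : List Int × Int) : Bool :=
  decide (-(pvAtt x.1) < -(pvAtt y.1)) ||
    (!decide (-(pvAtt y.1) < -(pvAtt x.1)) && decide (pvDef x.1 < pvDef y.1))

theorem pvBfr_trans (a b c : List Int × Int) (h1 : pvBfr a b = true) (h2 : pvBfr b c = true) :
    pvBfr a c = true := by
  simp only [pvBfr, Bool.or_eq_true, Bool.and_eq_true, Bool.not_eq_true',
    decide_eq_true_eq, decide_eq_false_iff_not] at *
  omega

theorem pvBfr_self (a : List Int × Int) : pvBfr a a = false := by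
  simp only [pvBfr, Bool.or_eq_false_iff, Bool.and_eq_false_iff, Bool.not_eq_false',
    decide_eq_false_iff_not, decide_eq_true_eq]
  omega

theorem pvBfr_asym (a b : List Int × Int) (h : pvBfr a b = true) : pvBfr b a = false := by
  simp only [pvBfr, Bool.or_eq_true, Bool.and_eq_true, Bool.not_eq_true',
    decide_eq_true_eq, decide_eq_false_iff_not, Bool.or_eq_false_iff,
    Bool.and_eq_false_iff, Bool.not_eq_false'] at *
  omega

theorem pvBfr_false_false (a b : List Int × Int) (h1 : pvBfr a b = false) (h2 : pvBfr b a = false) :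
    pvAtt a.1 = pvAtt b.1 ∧ pvDef a.1 = pvDef b.1 := by
  simp only [pvBfr, Bool.or_eq_false_iff, Bool.and_eq_false_iff, Bool.not_eq_false',
    decide_eq_false_iff_not, decide_eq_true_eq] at *
  omega

theorem pvBfr_iff_of_dlt (t s : List Int × Int) (hd : pvDef s.1 < pvDef t.1) :
    pvBfr t s = true ↔ pvAtt s.1 < pvAtt t.1 := by
  simp only [pvBfr, Bool.or_eq_true, Bool.and_eq_true, Bool.not_eq_true',
    decide_eq_true_eq, decide_eq_false_iff_not]
  omega

-- insertion sort's invariant: inserting keeps "no later element strictly-before an earlier one"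
theorem pvInsertBy_pairwise {α : Type} (before : α → α → Bool)
    (hasym : ∀ a b, before a b = true → before b a = false)
    (htr : ∀ a b c, before a b = true → before b c = true → before a c = true)
    (x : α) : ∀ (ys : List α), ys.Pairwise (fun a b => before b a = false) →
    (PySem.List.insertBy before x ys).Pairwise (fun a b => before b a = false) := by
  intro ys
  induction ys with
  | nil => intro _; simp [PySem.List.insertBy]
  | cons y ys ih =>
    intro hys
    rcases List.pairwise_cons.mp hys with ⟨hy, hys'⟩
    by_cases h : before x y = true
    · simp only [PySem.List.insertBy, h, if_true]
      refine List.pairwise_cons.mpr ⟨?_, hys⟩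
      intro z hz
      rcases List.mem_cons.mp hz with rfl | hz
      · exact hasym _ _ h
      · by_cases hb : before z x = true
        · have := htr z x y hb h
          rw [hy z hz] at this
          exact absurd this (by simp)
        · simpa using hb
    · simp only [PySem.List.insertBy, h]
      refine List.pairwise_cons.mpr ⟨?_, ih hys'⟩
      intro z hz
      rcases (PySem.List.mem_insertBy before x z ys).mp hz with rfl | hz
      · simpa using h
      · exact hy z hz

theorem pvFoldl_insertBy_pairwise {α : Type} (before : α → α → Bool)
    (hasym : ∀ a b, before a b = true → before b a = false)
    (htr : ∀ a b c, before a b = true → before b c = true → before a c = true) :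
    ∀ (xs acc : List α), acc.Pairwise (fun a b => before b a = false) →
    (xs.foldl (fun acc x => PySem.List.insertBy before x acc) acc).Pairwise
      (fun a b => before b a = false) := by
  intro xs
  induction xs with
  | nil => intro acc h; simpa using h
  | cons x xs ih =>
    intro acc h
    exact ih _ (pvInsertBy_pairwise before hasym htr x acc h)

theorem pvSorted2_eq (pairs : List (List Int × Int)) :
    PySem.List.sorted2 pairs (fun x => -(pvAtt x.1)) (fun x => pvDef x.1) =
      pairs.foldl (fun acc x => PySem.List.insertBy pvBfr x acc) [] := rfl

theorem scoreGo_length : ∀ (L : List (List Int × Int)) (ans : List String) (M : Int),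
    (scoreGo L ans M).length = ans.length := by
  intro L
  induction L with
  | nil => intro ans M; rfl
  | cons p rest ih =>
    intro ans M
    obtain ⟨s, idx⟩ := p
    simp only [scoreGo]
    split_ifs <;> rw [ih] <;> simp [PySem.List.length_pySetD]

theorem scoreGo_getElem?_not_mem : ∀ (L : List (List Int × Int)) (ans : List String) (M : Int)
    (k : Nat), (∀ i ∈ L.map (·.2), 0 ≤ i) → (k : Int) ∉ L.map (·.2) →
    (scoreGo L ans M)[k]? = ans[k]? := by
  intro L
  induction L with
  | nil => intro ans M k _ _; rfl
  | cons p rest ih =>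
    intro ans M k hpos hk
    obtain ⟨s, idx⟩ := p
    simp only [List.map_cons, List.mem_cons, not_or] at hk hpos
    have hidx : (0:Int) ≤ idx := hpos idx (Or.inl rfl)
    have hne : idx.toNat ≠ k := by
      intro hEq
      exact hk.1 (by omega)
    simp only [scoreGo]
    have hset : ∀ v : String, (PySem.List.pySetD ans idx v)[k]? = ans[k]? := by
      intro v
      rw [PySem.List.pySetD_of_nonneg ans v hidx, List.getElem?_set_ne hne]
    split_ifs
    · rw [ih _ _ k (fun i hi => hpos i (Or.inr hi)) hk.2, hset]
    · rw [ih _ _ k (fun i hi => hpos i (Or.inr hi)) hk.2, hset]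

theorem scoreGo_getElem?_mem : ∀ (L : List (List Int × Int)) (ans : List String) (M : Int)
    (s : List Int) (k : Nat),
    (L.map (·.2)).Nodup → (∀ i ∈ L.map (·.2), 0 ≤ i) →
    L.Pairwise (fun p q => pvBfr q p = false) →
    (s, (k : Int)) ∈ L → k < ans.length →
    (scoreGo L ans M)[k]? =
      some (if pvDef s < M ∨ ∃ q ∈ L, pvBfr q (s, (k : Int)) = true ∧ pvDef s < pvDef q.1
            then "fail" else "pass") := by
  intro L
  induction L with
  | nil => intro ans M s k _ _ _ hmem _; simp at hmem
  | cons p rest ih =>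
    intro ans M s k hnd hpos hpw hmem hlen
    obtain ⟨t, j⟩ := p
    simp only [List.map_cons, List.nodup_cons] at hnd
    rcases List.pairwise_cons.mp hpw with ⟨hhead, hpw'⟩
    rcases List.mem_cons.mp hmem with heq | hmemr
    · -- the head of the sorted list is our element
      rw [Prod.mk.injEq] at heq
      obtain ⟨heq1, heq2⟩ := heq
      subst heq1; subst heq2
      have hC : (pvDef s < M ∨ ∃ q ∈ (s, (k : Int)) :: rest,
          pvBfr q (s, (k : Int)) = true ∧ pvDef s < pvDef q.1) ↔ pvDef s < M := by
        constructor
        · rintro (h | ⟨q, hq, hb, _⟩)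
          · exact h
          · rcases List.mem_cons.mp hq with rfl | hq
            · rw [pvBfr_self] at hb; cases hb
            · rw [hhead q hq] at hb; cases hb
        · exact Or.inl
      have hknotin : ((k : Int)) ∉ rest.map (·.2) := hnd.1
      have hposr : ∀ i ∈ rest.map (·.2), (0:Int) ≤ i := fun i hi => hpos i (by simp [hi])
      have hset : ∀ v : String, (PySem.List.pySetD ans ((k : Int)) v)[k]? = some v := by
        intro v
        rw [PySem.List.pySetD_of_nonneg ans v (by omega)]
        simpa using List.getElem?_set_self (by simpa using hlen)
      simp only [scoreGo]
      rw [if_congr hC rfl rfl]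
      by_cases hlt : pvDef s < M
      · rw [if_pos hlt, if_pos hlt,
          scoreGo_getElem?_not_mem rest _ M k hposr hknotin, hset]
      · rw [if_neg hlt, if_neg hlt,
          scoreGo_getElem?_not_mem rest _ (pvDef s) k hposr hknotin, hset]
    · -- our element sits in the tail
      have hkin : ((k : Int)) ∈ rest.map (·.2) := List.mem_map.mpr ⟨(s, (k : Int)), hmemr, rfl⟩
      have hposr : ∀ i ∈ rest.map (·.2), (0:Int) ≤ i := fun i hi => hpos i (by simp [hi])
      have hheadfalse : pvBfr (s, (k : Int)) (t, j) = false := hhead _ hmemr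
      simp only [scoreGo]
      by_cases hlt : pvDef t < M
      · rw [if_pos hlt, ih _ M s k hnd.2 hposr hpw' hmemr
          (by rw [PySem.List.length_pySetD]; exact hlen)]
        have hiff : (pvDef s < M ∨ ∃ q ∈ rest,
              pvBfr q (s, (k : Int)) = true ∧ pvDef s < pvDef q.1) ↔
            (pvDef s < M ∨ ∃ q ∈ (t, j) :: rest,
              pvBfr q (s, (k : Int)) = true ∧ pvDef s < pvDef q.1) := by
          constructor
          · rintro (h | ⟨q, hq, hb, hd⟩)
            · exact Or.inl h
            · exact Or.inr ⟨q, List.mem_cons_of_mem _ hq, hb, hd⟩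
          · rintro (h | ⟨q, hq, hb, hd⟩)
            · exact Or.inl h
            · rcases List.mem_cons.mp hq with rfl | hq
              · have hd' : pvDef s < pvDef t := hd
                exact Or.inl (by omega)
              · exact Or.inr ⟨q, hq, hb, hd⟩
        rw [if_congr hiff rfl rfl]
      · rw [if_neg hlt, ih _ (pvDef t) s k hnd.2 hposr hpw' hmemr
          (by rw [PySem.List.length_pySetD]; exact hlen)]
        have hiff : (pvDef s < pvDef t ∨ ∃ q ∈ rest,
              pvBfr q (s, (k : Int)) = true ∧ pvDef s < pvDef q.1) ↔
            (pvDef s < M ∨ ∃ q ∈ (t, j) :: rest,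
              pvBfr q (s, (k : Int)) = true ∧ pvDef s < pvDef q.1) := by
          constructor
          · rintro (hd | ⟨q, hq, hb, hd⟩)
            · by_cases hb : pvBfr (t, j) (s, (k : Int)) = true
              · exact Or.inr ⟨(t, j), List.mem_cons_self, hb, hd⟩
              · have heqd : pvDef t = pvDef s :=
                  (pvBfr_false_false (t, j) (s, (k : Int))
                    (Bool.not_eq_true _ ▸ hb) hheadfalse).2
                omega
            · exact Or.inr ⟨q, List.mem_cons_of_mem _ hq, hb, hd⟩
          · rintro (h | ⟨q, hq, hb, hd⟩)
            · exact Or.inl (by omega)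
            · rcases List.mem_cons.mp hq with rfl | hq
              · exact Or.inl hd
              · exact Or.inr ⟨q, hq, hb, hd⟩
        rw [if_congr hiff rfl rfl]

theorem pvBestDom_lt_aux (a d : Int) : ∀ (T : List (List Int)) (b : Int),
    (d < T.foldl (fun best t =>
        if pvAtt t > a ∧ pvDef t > d ∧ pvDef t > best then pvDef t else best) b) ↔
      (d < b ∨ ∃ t ∈ T, a < pvAtt t ∧ d < pvDef t) := by
  intro T
  induction T with
  | nil => intro b; simp
  | cons t T ih =>
    intro b
    simp only [List.foldl_cons, List.mem_cons]
    rw [ih]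
    by_cases h : pvAtt t > a ∧ pvDef t > d ∧ pvDef t > b
    · rw [if_pos h]
      constructor
      · intro _; exact Or.inr ⟨t, Or.inl rfl, h.1, h.2.1⟩
      · intro _; exact Or.inl h.2.1
    · rw [if_neg h]
      constructor
      · rintro (hb | ⟨u, hu, h1, h2⟩)
        · exact Or.inl hb
        · exact Or.inr ⟨u, Or.inr hu, h1, h2⟩
      · rintro (hb | ⟨u, (rfl | hu), h1, h2⟩)
        · exact Or.inl hb
        · push Not at h
          exact Or.inl (lt_of_lt_of_le h2 (h h1 h2))
        · exact Or.inr ⟨u, hu, h1, h2⟩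

theorem pvBestDom_lt (scores : List (List Int)) (a d : Int) :
    (d < pvBestDom scores a d) ↔ (d < -1 ∨ ∃ t ∈ scores, a < pvAtt t ∧ d < pvDef t) := by
  unfold pvBestDom
  rw [pvBestDom_lt_aux]

theorem score_student_getElem? (scores : List (List Int)) (k : Nat) (hk : k < scores.length) :
    (score_student scores)[k]? =
      some (if pvDef scores[k] < -1 ∨
              ∃ t ∈ scores, pvAtt scores[k] < pvAtt t ∧ pvDef scores[k] < pvDef t
            then "fail" else "pass") := by
  unfold score_student
  have hmap : ((PySem.List.pyRange 0 (scores.length : Int) 1).map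
      (fun i => (PySem.List.pyGetD scores i [], i))).map (·.2) =
      PySem.List.pyRange 0 (scores.length : Int) 1 := by
    rw [List.map_map]
    exact List.map_id _
  have perm := PySem.List.sorted2_perm
    ((PySem.List.pyRange 0 (scores.length : Int) 1).map
      (fun i => (PySem.List.pyGetD scores i [], i)))
    (fun x => -(pvAtt x.1)) (fun x => pvDef x.1) false
  have hLmap := perm.map (·.2)
  rw [hmap] at hLmap
  have hnd := hLmap.nodup_iff.mpr (PySem.List.nodup_pyRange_one 0 (scores.length : Int))
  have hpos : ∀ i ∈ (PySem.List.sorted2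
      ((PySem.List.pyRange 0 (scores.length : Int) 1).map
        (fun i => (PySem.List.pyGetD scores i [], i)))
      (fun x => -(pvAtt x.1)) (fun x => pvDef x.1)).map (·.2), (0:Int) ≤ i := by
    intro i hi
    have := hLmap.mem_iff.mp hi
    exact (PySem.List.mem_pyRange_one.mp this).1
  have hpw : (PySem.List.sorted2
      ((PySem.List.pyRange 0 (scores.length : Int) 1).map
        (fun i => (PySem.List.pyGetD scores i [], i)))
      (fun x => -(pvAtt x.1)) (fun x => pvDef x.1)).Pairwise
      (fun p q => pvBfr q p = false) := by
    rw [pvSorted2_eq]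
    exact pvFoldl_insertBy_pairwise pvBfr pvBfr_asym pvBfr_trans
      ((PySem.List.pyRange 0 (scores.length : Int) 1).map
        (fun i => (PySem.List.pyGetD scores i [], i))) [] (by simp)
  have hmem : (scores[k], (k : Int)) ∈ PySem.List.sorted2
      ((PySem.List.pyRange 0 (scores.length : Int) 1).map
        (fun i => (PySem.List.pyGetD scores i [], i)))
      (fun x => -(pvAtt x.1)) (fun x => pvDef x.1) := by
    refine perm.mem_iff.mpr (List.mem_map.mpr ⟨(k : Int), ?_, ?_⟩)
    · exact PySem.List.mem_pyRange_one.mpr ⟨by omega, by exact_mod_cast hk⟩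
    · rw [PySem.List.pyGetD_natCast, List.getD_eq_getElem scores [] hk]
  rw [scoreGo_getElem?_mem _ _ (-1) scores[k] k hnd hpos hpw hmem (by simpa using hk)]
  congr 1
  have hiff : (pvDef scores[k] < -1 ∨ ∃ q ∈ PySem.List.sorted2
        ((PySem.List.pyRange 0 (scores.length : Int) 1).map
          (fun i => (PySem.List.pyGetD scores i [], i)))
        (fun x => -(pvAtt x.1)) (fun x => pvDef x.1),
        pvBfr q (scores[k], (k : Int)) = true ∧ pvDef scores[k] < pvDef q.1) ↔
      (pvDef scores[k] < -1 ∨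
        ∃ t ∈ scores, pvAtt scores[k] < pvAtt t ∧ pvDef scores[k] < pvDef t) := by
    constructor
    · rintro (h | ⟨q, hq, hb, hd⟩)
      · exact Or.inl h
      · rcases List.mem_map.mp (perm.mem_iff.mp hq) with ⟨i, hi, rfl⟩
        rcases PySem.List.mem_pyRange_one.mp hi with ⟨h0, hn⟩
        refine Or.inr ⟨PySem.List.pyGetD scores i [],
          PySem.List.pyGetD_mem scores [] ⟨by omega, hn⟩, ?_, hd⟩
        exact (pvBfr_iff_of_dlt _ (scores[k], (k : Int)) hd).mp hb
    · rintro (h | ⟨t, ht, ha, hd⟩)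
      · exact Or.inl h
      · obtain ⟨j, hj, rfl⟩ := List.mem_iff_getElem.mp ht
        refine Or.inr ⟨(scores[j], (j : Int)), perm.mem_iff.mpr ?_, ?_, hd⟩
        · refine List.mem_map.mpr ⟨(j : Int), ?_, ?_⟩
          · exact PySem.List.mem_pyRange_one.mpr ⟨by omega, by exact_mod_cast hj⟩
          · rw [PySem.List.pyGetD_natCast, List.getD_eq_getElem scores [] hj]
        · exact (pvBfr_iff_of_dlt (scores[j], (j : Int)) (scores[k], (k : Int)) hd).mpr ha
  rw [if_congr hiff rfl rfl]

theorem score_student_length (scores : List (List Int)) :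
    (score_student scores).length = scores.length := by
  unfold score_student
  rw [scoreGo_length]
  simp

-- ===== VERDICT (by name: the statement is the Claim_ definition above) =====
theorem score_student_spec : Claim_equal_score_student := by
  intro scores _ _
  unfold Spec_score_student
  apply List.ext_getElem?
  intro k
  by_cases hk : k < scores.length
  · rw [score_student_getElem? scores k hk]
    unfold score_student_alt
    rw [List.getElem?_map, List.getElem?_eq_getElem hk]
    simp only [Option.map_some]
    congr 1
    by_cases hcond : pvDef scores[k] < pvBestDom scores (pvAtt scores[k]) (pvDef scores[k])
    · rw [if_pos hcond, if_pos ((pvBestDom_lt scores _ _).mp hcond)]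
    · rw [if_neg hcond, if_neg (fun h => hcond ((pvBestDom_lt scores _ _).mpr h))]
  · rw [List.getElem?_eq_none, List.getElem?_eq_none]
    · unfold score_student_alt; simp; omega
    · rw [score_student_length]; omega
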